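-- pv_equiv track=rewrite | github.com/MoyuZJ912/iFlyCompass | chapter_devider.py | count_blank_lines
-- ===== SOURCE A (Python) =====
-- def count_blank_lines(lines, lineno, direction='before'):
--     """统计指定行前方/后方的连续空行数"""
--     count = 0
--     if direction == 'before':
--         i = lineno - 1
--         while i >= 0 and not lines[i].strip():
--             count += 1
--             i -= 1
--     else:
--         i = lineno + 1
--         while i < len(lines) and not lines[i].strip():
--             count += 1
--             i += 1
--     return count
-- ===== SOURCE B (Python) =====
-- def count_blank_lines(lines, lineno, direction='before'):
--     """统计指定行前方/后方的连续空行数"""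
--     if direction == 'before':
--         seq = list(reversed(lines[:lineno]))
--     else:
--         seq = lines[lineno + 1:]
--     blanks = [not l.strip() for l in seq]
--     return blanks.index(False) if False in blanks else len(blanks)
-- ===== Notes on version B (the rewrite author's own statement) =====
-- stated objective: idiomatic
-- what changed: Replaces the index-walking while loop with a declarative pipeline: pick the scan sequence by slicing (reversed prefix for 'before', suffix for 'after'), map each line to a blankness flag, and return the position of the first non-blank flag (or the sequence length).
-- outside the precondition, e.g. on count_blank_lines(['', 'x'], -1, 'before'): A returns 0, B returns 1; on count_blank_lines(['', ''], -3, 'after'): A returns 4, B returns 2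
import Mathlib
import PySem

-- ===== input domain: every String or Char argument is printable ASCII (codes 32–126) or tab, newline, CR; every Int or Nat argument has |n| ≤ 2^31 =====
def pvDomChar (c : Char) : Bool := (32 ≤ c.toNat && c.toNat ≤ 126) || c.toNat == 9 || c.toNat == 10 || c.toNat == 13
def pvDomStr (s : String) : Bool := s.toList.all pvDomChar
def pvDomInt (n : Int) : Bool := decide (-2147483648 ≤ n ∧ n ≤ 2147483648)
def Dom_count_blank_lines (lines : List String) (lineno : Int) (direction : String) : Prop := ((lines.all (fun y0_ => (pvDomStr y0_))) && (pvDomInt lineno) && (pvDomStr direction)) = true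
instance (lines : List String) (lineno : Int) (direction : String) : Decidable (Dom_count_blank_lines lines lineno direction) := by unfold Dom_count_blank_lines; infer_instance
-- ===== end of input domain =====

-- B replaces A's index-walking while loop by slicing out the scan sequence and locating
-- the first non-blank entry (idiomatic decomposition; no speed claim).

-- ===== PORT A =====
-- while i >= 0 and not lines[i].strip(): count += 1; i -= 1
def cblBeforeLoop (lines : List String) (i : Int) (count : Int) : Int :=
  if _h : 0 ≤ i then
    match PySem.List.pyGet? lines i with
    | some s => if PySem.Str.strip s = "" then cblBeforeLoop lines (i - 1) (count + 1) else count
    | none => count   -- Python raises IndexError here; excluded by Pre_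
  else count
termination_by (i + 1).toNat
decreasing_by omega

-- while i < len(lines) and not lines[i].strip(): count += 1; i += 1
def cblAfterLoop (lines : List String) (i : Int) (count : Int) : Int :=
  if _h : i < (lines.length : Int) then
    match PySem.List.pyGet? lines i with
    | some s => if PySem.Str.strip s = "" then cblAfterLoop lines (i + 1) (count + 1) else count
    | none => count   -- Python negative-index IndexError; excluded by Pre_
  else count
termination_by ((lines.length : Int) - i).toNat
decreasing_by omega

def count_blank_lines (lines : List String) (lineno : Int) (direction : String) : Int :=
  if direction = "before" then cblBeforeLoop lines (lineno - 1) 0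
  else cblAfterLoop lines (lineno + 1) 0

-- ===== PORT B =====
def count_blank_lines_alt (lines : List String) (lineno : Int) (direction : String) : Int :=
  let seq := if direction = "before"
    then (PySem.List.slice lines none (some lineno)).reverse   -- list(reversed(lines[:lineno]))
    else PySem.List.slice lines (some (lineno + 1)) none       -- lines[lineno + 1:]
  let blanks := seq.map (fun l => PySem.Str.strip l == "")     -- [not l.strip() for l in seq] (truthiness: blank iff strip empty)
  match PySem.List.index? blanks false with                    -- blanks.index(False) if False in blanks
  | some k => (k : Int)
  | none => (blanks.length : Int)                              -- else len(blanks)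

-- ===== PRECONDITION & SPEC =====
-- Pre_ excludes negative lineno beyond the natural domain (for 'before' any lineno < 0, where A's
-- constant 0 comes from a failed bound check; for 'after' lineno < -1, where A wraps around and
-- double-counts via Python negative indexing — implementation accidents) and 'before' with
-- lineno > len(lines), where A raises IndexError.
def Pre_count_blank_lines (lines : List String) (lineno : Int) (direction : String) : Prop :=
  (direction = "before" → 0 ≤ lineno ∧ lineno ≤ (lines.length : Int)) ∧
  (direction ≠ "before" → -1 ≤ lineno)
instance (lines : List String) (lineno : Int) (direction : String) : Decidable (Pre_count_blank_lines lines lineno direction) := by unfold Pre_count_blank_lines; infer_instance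

def pvWitness_count_blank_lines : List String × Int × String := (["a", "", "  ", "b"], 3, "before")

def Spec_count_blank_lines (lines : List String) (lineno : Int) (direction : String) (out : Int) : Prop := out = count_blank_lines_alt lines lineno direction
instance (lines : List String) (lineno : Int) (direction : String) (out : Int) : Decidable (Spec_count_blank_lines lines lineno direction out) := by unfold Spec_count_blank_lines; infer_instance

-- ===== CLAIM (what is proved, stated in full; the proofs are below) =====
def Claim_equal_count_blank_lines : Prop := ∀ (lines : List String) (lineno : Int) (direction : String), Dom_count_blank_lines lines lineno direction → Pre_count_blank_lines lines lineno direction → Spec_count_blank_lines lines lineno direction (count_blank_lines lines lineno direction)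

-- ===== LEMMAS AND PROOFS =====

-- number of leading `true` flags, as B's index-of-first-False computes it
def countLead : List Bool → Int
  | [] => 0
  | b :: t => if b then countLead t + 1 else 0

lemma index?_false_eq_countLead (bs : List Bool) :
    (match PySem.List.index? bs false with
      | some k => (k : Int)
      | none => (bs.length : Int)) = countLead bs := by
  induction bs with
  | nil => simp [PySem.List.index?, countLead]
  | cons b t ih =>
    cases b with
    | false =>
      rw [PySem.List.index?_cons_self]
      simp [countLead]
    | true =>
      rw [PySem.List.index?_cons_of_ne t (by decide)]
      have hc : countLead (true :: t) = countLead t + 1 := by simp [countLead]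
      rw [hc, ← ih]
      cases h : PySem.List.index? t false with
      | none => simp
      | some k => simp

def blankFlag (l : String) : Bool := PySem.Str.strip l == ""

lemma countLead_cons (l : String) (t : List String) :
    countLead ((l :: t).map blankFlag)
      = if PySem.Str.strip l = "" then countLead (t.map blankFlag) + 1 else 0 := by
  simp only [List.map, countLead, blankFlag]
  by_cases h : PySem.Str.strip l = "" <;> simp [h]

lemma cblAfterLoop_eq (lines : List String) :
    ∀ (k : Nat) (i c : Int), 0 ≤ i → ((lines.length : Int) - i).toNat = k →
      cblAfterLoop lines i c = c + countLead ((lines.drop i.toNat).map blankFlag) := by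
  intro k
  induction k with
  | zero =>
    intro i c hi hk
    have hlen : (lines.length : Int) ≤ i := by omega
    rw [cblAfterLoop]
    rw [dif_neg (by omega)]
    have : lines.drop i.toNat = [] := List.drop_eq_nil_of_le (by omega)
    simp [this, countLead]
  | succ k ih =>
    intro i c hi hk
    have hilt : i < (lines.length : Int) := by omega
    have hnat : i.toNat < lines.length := by omega
    rw [cblAfterLoop, dif_pos hilt]
    rw [PySem.List.pyGet?_eq_some_getElem lines hi hilt]
    dsimp only
    have hdrop : lines.drop i.toNat = lines[i.toNat] :: lines.drop (i.toNat + 1) :=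
      List.drop_eq_getElem_cons hnat
    rw [hdrop, countLead_cons]
    by_cases hb : PySem.Str.strip lines[i.toNat] = ""
    · rw [if_pos hb, if_pos hb]
      rw [ih (i + 1) (c + 1) (by omega) (by omega)]
      have : (i + 1).toNat = i.toNat + 1 := by omega
      rw [this]; ring
    · rw [if_neg hb, if_neg hb]; ring

lemma cblBeforeLoop_eq (lines : List String) :
    ∀ (k : Nat) (i c : Int), i + 1 ≤ (lines.length : Int) → (i + 1).toNat = k →
      cblBeforeLoop lines i c = c + countLead (((lines.take (i + 1).toNat).reverse).map blankFlag) := by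
  intro k
  induction k with
  | zero =>
    intro i c _ hk
    have hneg : ¬ (0 ≤ i) := by omega
    rw [cblBeforeLoop, dif_neg hneg]
    have : (i + 1).toNat = 0 := hk
    simp [this, countLead]
  | succ k ih =>
    intro i c hle hk
    have hi : 0 ≤ i := by omega
    have hilt : i < (lines.length : Int) := by omega
    have hnat : i.toNat < lines.length := by omega
    rw [cblBeforeLoop, dif_pos hi]
    rw [PySem.List.pyGet?_eq_some_getElem lines hi hilt]
    dsimp only
    have htake : lines.take (i + 1).toNat = lines.take i.toNat ++ [lines[i.toNat]] := by
      have h1 : (i + 1).toNat = i.toNat + 1 := by omega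
      rw [h1]
      exact List.take_succ_eq_append_getElem hnat
    rw [htake, List.reverse_append]
    simp only [List.reverse_singleton, List.singleton_append]
    rw [countLead_cons]
    by_cases hb : PySem.Str.strip lines[i.toNat] = ""
    · rw [if_pos hb, if_pos hb]
      rw [ih (i - 1) (c + 1) (by omega) (by omega)]
      have : (i - 1 + 1).toNat = i.toNat := by omega
      rw [this]; ring
    · rw [if_neg hb, if_neg hb]; ring

-- ===== VERDICT (by name: the statement is the Claim_ definition above) =====
theorem count_blank_lines_spec : Claim_equal_count_blank_lines := by
  intro lines lineno direction _ hpre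
  obtain ⟨hbef, haft⟩ := hpre
  unfold Spec_count_blank_lines count_blank_lines count_blank_lines_alt
  by_cases hd : direction = "before"
  · rw [if_pos hd, if_pos hd]
    obtain ⟨hnn, hlen⟩ := hbef hd
    rw [cblBeforeLoop_eq lines (lineno - 1 + 1).toNat (lineno - 1) 0 (by omega) rfl]
    have h1 : (lineno - 1 + 1).toNat = lineno.toNat := by omega
    rw [h1, PySem.List.slice_to lines hnn, index?_false_eq_countLead, zero_add]
    rfl
  · have hm1 : -1 ≤ lineno := haft hd
    rw [if_neg hd, if_neg hd]
    rw [cblAfterLoop_eq lines ((lines.length : Int) - (lineno + 1)).toNat (lineno + 1) 0 (by omega) rfl]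
    rw [PySem.List.slice_from lines (show (0:Int) ≤ lineno + 1 by omega), index?_false_eq_countLead, zero_add]
    rfl
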